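-- pv_equiv track=rewrite | github.com/BockSong/cs61A | project/hog/hog.py | is_perfect_piggy
-- ===== SOURCE A (Python) =====
-- def is_perfect_piggy(turn_score):
--     """Returns whether the Perfect Piggy dice-swapping rule should occur."""
--     # BEGIN PROBLEM 4
--     if turn_score==1:
--          return False
--     iterator=2
--     while iterator<=turn_score/2:
--         if iterator**2==turn_score or iterator**3==turn_score:
--             return True
--         iterator+=1
--     return False
-- ===== SOURCE B (Python) =====
-- def is_perfect_piggy(turn_score):
--     """Returns whether the Perfect Piggy dice-swapping rule should occur."""
--     i = 2
--     while i * i <= turn_score: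
--         if i * i == turn_score:
--             return True
--         i += 1
--     i = 2
--     while i * i * i <= turn_score:
--         if i * i * i == turn_score:
--             return True
--         i += 1
--     return False
-- ===== Notes on version B (the rewrite author's own statement) =====
-- stated objective: faster
-- what changed: Replaces the single scan of all candidates up to half the score with a square scan bounded by the square root followed by a cube scan bounded by the cube root, dropping the special guard for a score of one.
import Mathlib
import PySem

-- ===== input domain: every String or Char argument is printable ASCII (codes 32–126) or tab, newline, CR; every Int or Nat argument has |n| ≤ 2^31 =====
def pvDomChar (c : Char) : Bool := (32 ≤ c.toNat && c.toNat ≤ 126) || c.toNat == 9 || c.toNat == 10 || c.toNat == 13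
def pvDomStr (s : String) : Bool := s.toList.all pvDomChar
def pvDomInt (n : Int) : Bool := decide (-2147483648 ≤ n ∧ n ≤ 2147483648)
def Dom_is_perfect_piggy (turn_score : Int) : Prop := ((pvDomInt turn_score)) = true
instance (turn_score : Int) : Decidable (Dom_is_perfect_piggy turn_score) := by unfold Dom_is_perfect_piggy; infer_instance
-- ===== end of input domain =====

-- B replaces A's single scan up to turn_score/2 by a square-root-bounded square scan
-- followed by a cube-root-bounded cube scan (objective: faster, O(sqrt n) vs O(n)).


-- ===== PORT A =====
-- A's while loop: iterator runs from 2 while iterator <= turn_score/2.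
-- For int inputs |n| ≤ 2^31 Python's float comparison iterator <= n/2 is exactly 2*iterator ≤ n.
def pvALoop (n : Int) (i : Nat) : Bool :=
  if h : 2 * (i : Int) ≤ n then
    if (i : Int) ^ 2 = n ∨ (i : Int) ^ 3 = n then true
    else pvALoop n (i + 1)
  else false
termination_by n.toNat + 1 - i
decreasing_by
  omega

def is_perfect_piggy (turn_score : Int) : Bool :=
  if turn_score = 1 then false
  else pvALoop turn_score 2

-- ===== PORT B =====
-- first loop of Source B: i from 2 while i*i <= n
def pvSqScan (n : Int) (i : Nat) : Bool :=
  if h : (i : Int) * i ≤ n then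
    if (i : Int) * i = n then true
    else pvSqScan n (i + 1)
  else false
termination_by n.toNat + 1 - i
decreasing_by
  have h1 : (i : Int) ≤ (i : Int) * i := by nlinarith [Int.natCast_nonneg i]
  omega

-- second loop of Source B: i from 2 while i*i*i <= n
def pvCbScan (n : Int) (i : Nat) : Bool :=
  if h : (i : Int) * i * i ≤ n then
    if (i : Int) * i * i = n then true
    else pvCbScan n (i + 1)
  else false
termination_by n.toNat + 1 - i
decreasing_by
  have h1 : (i : Int) ≤ (i : Int) * i * i := by
    have hle : i ≤ i * i * i := by
      rcases Nat.eq_zero_or_pos i with h0 | h0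
      · simp [h0]
      · calc i = i * 1 * 1 := by ring
          _ ≤ i * i * i := Nat.mul_le_mul (Nat.mul_le_mul (le_refl i) h0) h0
    exact_mod_cast hle
  omega

def is_perfect_piggy_alt (turn_score : Int) : Bool :=
  pvSqScan turn_score 2 || pvCbScan turn_score 2

-- ===== PRECONDITION & SPEC =====
def Spec_is_perfect_piggy (turn_score : Int) (out : Bool) : Prop := out = is_perfect_piggy_alt turn_score
instance (turn_score : Int) (out : Bool) : Decidable (Spec_is_perfect_piggy turn_score out) := by unfold Spec_is_perfect_piggy; infer_instance

-- ===== CLAIM (what is proved, stated in full; the proofs are below) =====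
def Claim_equal_is_perfect_piggy : Prop := ∀ (turn_score : Int), Dom_is_perfect_piggy turn_score → Spec_is_perfect_piggy turn_score (is_perfect_piggy turn_score)

-- ===== LEMMAS AND PROOFS =====

lemma pvSqScan_iff (n : Int) (i : Nat) :
    pvSqScan n i = true ↔ ∃ j : Nat, i ≤ j ∧ (j : Int) * j = n := by
  fun_induction pvSqScan n i with
  | case1 i h heq =>
      exact iff_of_true rfl ⟨i, le_refl i, heq⟩
  | case2 i h hne ih =>
      rw [ih]
      constructor
      · rintro ⟨j, hij, hj⟩; exact ⟨j, Nat.le_of_succ_le hij, hj⟩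
      · rintro ⟨j, hij, hj⟩
        rcases Nat.lt_or_ge i j with hlt | hge
        · exact ⟨j, hlt, hj⟩
        · have hji : j = i := le_antisymm hge hij
          subst hji
          exact absurd hj hne
  | case3 i h =>
      simp only [Bool.false_eq_true, false_iff]
      rintro ⟨j, hij, hj⟩
      have hle : (i : Int) * i ≤ (j : Int) * j := by
        exact_mod_cast Nat.mul_le_mul hij hij
      omega

lemma pvCbScan_iff (n : Int) (i : Nat) :
    pvCbScan n i = true ↔ ∃ j : Nat, i ≤ j ∧ (j : Int) * j * j = n := by
  fun_induction pvCbScan n i with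
  | case1 i h heq =>
      exact iff_of_true rfl ⟨i, le_refl i, heq⟩
  | case2 i h hne ih =>
      rw [ih]
      constructor
      · rintro ⟨j, hij, hj⟩; exact ⟨j, Nat.le_of_succ_le hij, hj⟩
      · rintro ⟨j, hij, hj⟩
        rcases Nat.lt_or_ge i j with hlt | hge
        · exact ⟨j, hlt, hj⟩
        · have hji : j = i := le_antisymm hge hij
          subst hji
          exact absurd hj hne
  | case3 i h =>
      simp only [Bool.false_eq_true, false_iff]
      rintro ⟨j, hij, hj⟩
      have hle : (i : Int) * i * i ≤ (j : Int) * j * j := by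
        exact_mod_cast Nat.mul_le_mul (Nat.mul_le_mul hij hij) hij
      omega

lemma pvALoop_iff (n : Int) (i : Nat) :
    2 ≤ i → (pvALoop n i = true ↔
      ∃ j : Nat, i ≤ j ∧ ((j : Int) * j = n ∨ (j : Int) * j * j = n)) := by
  fun_induction pvALoop n i with
  | case1 i h heq =>
      intro hi
      apply iff_of_true rfl
      refine ⟨i, le_refl i, ?_⟩
      rcases heq with h2 | h3
      · left; rw [← h2]; ring
      · right; rw [← h3]; ring
  | case2 i h hne ih =>
      intro hi
      rw [ih (by omega)]
      constructor
      · rintro ⟨j, hij, hj⟩; exact ⟨j, Nat.le_of_succ_le hij, hj⟩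
      · rintro ⟨j, hij, hj⟩
        rcases Nat.lt_or_ge i j with hlt | hge
        · exact ⟨j, hlt, hj⟩
        · have hji : j = i := le_antisymm hge hij
          subst hji
          exfalso; apply hne
          rcases hj with h2 | h3
          · left; rw [← h2]; ring
          · right; rw [← h3]; ring
  | case3 i h =>
      intro hi
      simp only [Bool.false_eq_true, false_iff]
      rintro ⟨j, hij, hj⟩
      have hj2 : (2 : Int) ≤ (j : Int) := by exact_mod_cast le_trans hi hij
      have hijZ : (i : Int) ≤ (j : Int) := by exact_mod_cast hij
      have h2j : 2 * (j : Int) ≤ n := by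
        rcases hj with h2 | h3
        · nlinarith
        · nlinarith
      omega

-- ===== VERDICT (by name: the statement is the Claim_ definition above) =====
theorem is_perfect_piggy_spec : Claim_equal_is_perfect_piggy := by
  intro n _
  unfold Spec_is_perfect_piggy is_perfect_piggy is_perfect_piggy_alt
  by_cases h1 : n = 1
  · subst h1
    rw [if_pos rfl]
    have hs : pvSqScan 1 2 = false := by
      rw [← Bool.not_eq_true, pvSqScan_iff]
      rintro ⟨j, hj, hjj⟩
      have hj2 : (2 : Int) ≤ (j : Int) := by exact_mod_cast hj
      nlinarith
    have hc : pvCbScan 1 2 = false := by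
      rw [← Bool.not_eq_true, pvCbScan_iff]
      rintro ⟨j, hj, hjj⟩
      have hj2 : (2 : Int) ≤ (j : Int) := by exact_mod_cast hj
      nlinarith
    rw [hs, hc]
    rfl
  · rw [if_neg h1, Bool.eq_iff_iff, Bool.or_eq_true,
        pvALoop_iff n 2 (le_refl 2), pvSqScan_iff, pvCbScan_iff]
    constructor
    · rintro ⟨j, hj, h2 | h3⟩
      · exact Or.inl ⟨j, hj, h2⟩
      · exact Or.inr ⟨j, hj, h3⟩
    · rintro (⟨j, hj, h2⟩ | ⟨j, hj, h3⟩)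
      · exact ⟨j, hj, Or.inl h2⟩
      · exact ⟨j, hj, Or.inr h3⟩
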